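-- pv_equiv track=rewrite | github.com/yasser942/LEFT_AND-RIGHT-MOST-DERIVATION | LEFT AND RIGHT MOST DERIVATION/2019510006_YASSER_ELHASAN_2019510072_Harun_Adem_Temur.py | splitLL_input
-- ===== SOURCE A (Python) =====
-- def splitLL_input(input, terminals):  # Splits the elements in input string
--     # and returns them as a list
--
--     tokens = []
--     buffer = ""
--     index = 0
--
--     # Iterate through each character in the input string
--     while index < len(input):
--         char = input[index]
--         if char in terminals:
--             # If the character is a terminal symbol, add it to the tokens list
--             if buffer:
--                 tokens.append(buffer)
--                 buffer = ""
--             tokens.append(char)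
--             index += 1
--         else:
--             # If the character is not a terminal symbol, append it to the buffer
--             buffer += char
--             index += 1
--
--     # Add any remaining characters in the buffer to the tokens list
--     if buffer:
--         tokens.append(buffer)
--     return tokens
-- ===== SOURCE B (Python) =====
-- def splitLL_input(input, terminals):  # Splits the elements in input string
--     # and returns them as a list.
--     # Run-based scan: terminals are emitted one by one; a maximal run of
--     # non-terminal characters is located with an inner scan and sliced out
--     # as one token (no character-by-character buffer).
--     tokens = []
--     i = 0
--     n = len(input)
--     while i < n:
--         if input[i] in terminals:
--             tokens.append(input[i])
--             i += 1
--         else: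
--             j = i + 1
--             while j < n and input[j] not in terminals:
--                 j += 1
--             tokens.append(input[i:j])
--             i = j
--     return tokens
-- ===== Notes on version B (the rewrite author's own statement) =====
-- stated objective: alternative
-- what changed: B replaces A's character-by-character buffer accumulation with a run-based scan: an inner loop finds the end of each maximal non-terminal run and the whole run is sliced out as one token.
import Mathlib
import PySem

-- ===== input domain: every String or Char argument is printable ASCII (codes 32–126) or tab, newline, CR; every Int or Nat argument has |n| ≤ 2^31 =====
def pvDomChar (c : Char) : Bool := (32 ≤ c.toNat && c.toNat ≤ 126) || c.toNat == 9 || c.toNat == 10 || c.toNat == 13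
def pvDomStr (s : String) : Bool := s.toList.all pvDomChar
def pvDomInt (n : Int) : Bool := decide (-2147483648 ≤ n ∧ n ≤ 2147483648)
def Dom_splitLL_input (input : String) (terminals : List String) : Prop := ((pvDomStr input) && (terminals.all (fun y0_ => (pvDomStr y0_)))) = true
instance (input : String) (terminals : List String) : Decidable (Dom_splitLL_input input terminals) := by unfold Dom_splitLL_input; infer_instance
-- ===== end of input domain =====

-- B replaces A's character-by-character buffer accumulation with a run-based scan
-- (inner loop finds the end of each maximal non-terminal run, sliced out as one token).

-- `char in terminals` for a single character char (string equality against each terminal)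
def pvIsTerm (terminals : List String) (c : Char) : Bool :=
  terminals.any (fun t => t.toList == [c])

-- ===== PORT A =====
-- the while loop of A: state = (tokens, buffer), consuming the remaining characters
def splitA (terminals : List String) (tokens : List String) (buf : List Char) :
    List Char → List String
  | [] => if buf.isEmpty then tokens else tokens ++ [String.ofList buf]
  | c :: rest =>
    if pvIsTerm terminals c then
      splitA terminals
        ((if buf.isEmpty then tokens else tokens ++ [String.ofList buf]) ++ [String.ofList [c]]) [] rest
    else
      splitA terminals tokens (buf ++ [c]) rest

def splitLL_input (input : String) (terminals : List String) : List String :=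
  splitA terminals [] [] input.toList

-- ===== PORT B =====
-- the outer while loop of B over the remaining suffix; the inner while that advances j
-- to the end of the non-terminal run is `takeWhile`, the slices input[i:j] / input[j:]
-- are the run and the dropped suffix
def splitB (terminals : List String) : List Char → List String
  | [] => []
  | c :: rest =>
    if pvIsTerm terminals c then
      String.ofList [c] :: splitB terminals rest
    else
      let run := rest.takeWhile (fun x => !pvIsTerm terminals x)
      String.ofList (c :: run) :: splitB terminals (rest.drop run.length)
  termination_by cs => cs.length
  decreasing_by
    · simp
    · simp only [List.length_drop, List.length_cons]; omega

def splitLL_input_alt (input : String) (terminals : List String) : List String :=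
  splitB terminals input.toList

-- ===== PRECONDITION & SPEC =====
def Spec_splitLL_input (input : String) (terminals : List String) (out : List String) : Prop := out = splitLL_input_alt input terminals
instance (input : String) (terminals : List String) (out : List String) : Decidable (Spec_splitLL_input input terminals out) := by unfold Spec_splitLL_input; infer_instance

-- ===== CLAIM (what is proved, stated in full; the proofs are below) =====
def Claim_equal_splitLL_input : Prop := ∀ (input : String) (terminals : List String), Dom_splitLL_input input terminals → Spec_splitLL_input input terminals (splitLL_input input terminals)

-- ===== LEMMAS AND PROOFS =====

-- A's tokens accumulator is only ever appended to
theorem splitA_accum (terminals : List String) (cs : List Char) (tokens : List String)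
    (buf : List Char) :
    splitA terminals tokens buf cs = tokens ++ splitA terminals [] buf cs := by
  induction cs generalizing tokens buf with
  | nil => simp only [splitA]; split <;> simp
  | cons c rest ih =>
    simp only [splitA]
    split
    · rw [ih, ih]
      split <;> (conv_rhs => rw [ih]) <;> simp
    · exact ih tokens (buf ++ [c])

-- a buffer of non-terminal characters is swallowed whole by B's takeWhile
theorem takeWhile_nonterm (terminals : List String) (bs : List Char)
    (hbs : ∀ b ∈ bs, pvIsTerm terminals b = false) :
    bs.takeWhile (fun x => !pvIsTerm terminals x) = bs :=
  List.takeWhile_eq_self_iff.mpr (fun x hx => by simp [hbs x hx])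

-- main invariant: A with a (non-terminal) pending buffer equals B on buffer ++ rest
theorem splitA_eq_splitB (terminals : List String) (cs buf : List Char)
    (hbuf : ∀ b ∈ buf, pvIsTerm terminals b = false) :
    splitA terminals [] buf cs = splitB terminals (buf ++ cs) := by
  induction cs generalizing buf with
  | nil =>
    cases buf with
    | nil => simp [splitA, splitB]
    | cons b bs =>
      have hb := hbuf b (by simp)
      have hbs := takeWhile_nonterm terminals bs (fun x hx => hbuf x (by simp [hx]))
      simp [splitA, splitB, hb, hbs]
  | cons c rest ih =>
    by_cases hc : pvIsTerm terminals c = true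
    · cases buf with
      | nil =>
        simp only [splitA, splitB, hc, if_pos, List.nil_append, List.isEmpty_nil]
        rw [splitA_accum, ih [] (by simp)]
        simp
      | cons b bs =>
        have hb := hbuf b (by simp)
        have hself := takeWhile_nonterm terminals bs (fun x hx => hbuf x (by simp [hx]))
        have htw : (bs ++ c :: rest).takeWhile (fun x => !pvIsTerm terminals x) = bs := by
          rw [List.takeWhile_append, hself, if_pos rfl, List.takeWhile_cons]
          simp [hc]
        simp only [splitA, hc, if_pos, List.isEmpty_cons, Bool.false_eq_true,
          List.cons_append, splitB, hb]
        rw [splitA_accum]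
        simp only [htw, List.drop_left, splitB, hc, if_pos]
        rw [splitA_accum, ih [] (by simp)]
        simp
    · have hc' : pvIsTerm terminals c = false := by simpa using hc
      have hbc : ∀ b ∈ buf ++ [c], pvIsTerm terminals b = false := by
        intro b hb
        rcases List.mem_append.mp hb with h | h
        · exact hbuf b h
        · simp at h; simp [h, hc']
      have := ih (buf ++ [c]) hbc
      simp only [splitA, hc', Bool.false_eq_true, if_false]
      rw [this]
      simp

-- ===== VERDICT (by name: the statement is the Claim_ definition above) =====
theorem splitLL_input_spec : Claim_equal_splitLL_input := by
  intro input terminals _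
  unfold Spec_splitLL_input splitLL_input splitLL_input_alt
  simpa using splitA_eq_splitB terminals input.toList [] (by simp)
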